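-- pv_equiv track=rewrite | github.com/riffAt2013/Fall2018 | Practices/ATBSWP_dictionary_prob.py | addInv
-- ===== SOURCE A (Python) =====
-- def addInv (inv, loot):
-- 	for i in loot:
-- 		if i in inv.keys():
-- 			inv.setdefault(i, inv[i])
-- 			inv[i] += 1
-- 		else:
-- 			inv.setdefault(i, 0)
-- 			inv[i] += 1
-- 	return inv
-- ===== SOURCE B (Python) =====
-- def addInv(inv, loot):
--     counts = {}
--     for i in loot:
--         counts[i] = counts.get(i, 0) + 1
--     for k, v in counts.items():
--         inv[k] = inv.get(k, 0) + v
--     return inv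
-- ===== Notes on version B (the rewrite author's own statement) =====
-- stated objective: alternative
-- what changed: A increments inv one loot item at a time inside a single membership-testing loop; B first builds a frequency table of loot in one counting pass and then merges each distinct key's total count into inv in a second pass over the table.
import Mathlib
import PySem

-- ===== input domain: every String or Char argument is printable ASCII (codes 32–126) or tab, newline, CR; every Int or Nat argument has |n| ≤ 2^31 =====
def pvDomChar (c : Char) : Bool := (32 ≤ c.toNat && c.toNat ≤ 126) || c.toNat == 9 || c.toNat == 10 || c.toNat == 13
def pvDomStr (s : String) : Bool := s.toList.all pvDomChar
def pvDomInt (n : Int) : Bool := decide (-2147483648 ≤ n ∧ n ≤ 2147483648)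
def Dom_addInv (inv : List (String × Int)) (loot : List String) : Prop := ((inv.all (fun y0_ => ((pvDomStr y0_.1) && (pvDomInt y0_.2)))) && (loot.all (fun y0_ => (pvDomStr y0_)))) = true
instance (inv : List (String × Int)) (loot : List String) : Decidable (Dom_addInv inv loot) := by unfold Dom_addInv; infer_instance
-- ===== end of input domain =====

-- B replaces A's per-item increment loop by a two-phase merge: build a frequency table of loot
-- first, then fold each distinct key's total count into inv once (objective: alternative).
-- Both Pythons mutate inv in place; the equivalence proved here is about the returned value.


-- ===== PORT A =====
-- Literal port of A: one pass over loot; `i in inv.keys()` is d.contains; in the then-branch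
-- inv[i] exists, so `inv.setdefault(i, inv[i])` is d.setdefault i (d.getD i 0); `inv[i] += 1`
-- reads the (now present) key and stores the incremented value.
def addInv (inv : List (String × Int)) (loot : List String) : List (String × Int) :=
  (loot.foldl (fun d i =>
      if d.contains i then
        let d1 := d.setdefault i (d.getD i 0)
        d1.insert i (d1.getD i 0 + 1)
      else
        let d1 := d.setdefault i 0
        d1.insert i (d1.getD i 0 + 1))
    (PySem.Dict.mk inv)).items

-- ===== PORT B =====
-- Literal port of B: first loop builds the frequency table `counts`, second loop merges each
-- (key, total) pair of the table into inv.
def addInv_alt (inv : List (String × Int)) (loot : List String) : List (String × Int) :=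
  let counts := loot.foldl (fun c i => c.insert i (c.getD i 0 + 1)) PySem.Dict.empty
  (counts.items.foldl (fun d kv => d.insert kv.1 (d.getD kv.1 0 + kv.2)) (PySem.Dict.mk inv)).items

-- ===== PRECONDITION & SPEC =====
def Spec_addInv (inv : List (String × Int)) (loot : List String) (out : List (String × Int)) : Prop := out = addInv_alt inv loot
instance (inv : List (String × Int)) (loot : List String) (out : List (String × Int)) : Decidable (Spec_addInv inv loot out) := by unfold Spec_addInv; infer_instance

-- ===== CLAIM (what is proved, stated in full; the proofs are below) =====
def Claim_equal_addInv : Prop := ∀ (inv : List (String × Int)) (loot : List String), Dom_addInv inv loot → Spec_addInv inv loot (addInv inv loot)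

-- ===== LEMMAS AND PROOFS =====

-- the merge step of B's second loop
def mgStep (d : PySem.Dict String Int) (kv : String × Int) : PySem.Dict String Int :=
  d.insert kv.1 (d.getD kv.1 0 + kv.2)

-- how one extra occurrence of x changes a frequency table's item list
def bump (ps : List (String × Int)) (x : String) : List (String × Int) :=
  if x ∈ ps.map (·.1) then ps.map (fun p => if p.1 = x then (p.1, p.2 + 1) else p)
  else ps ++ [(x, 1)]

-- A's loop body simplifies to a single insert
lemma stepA_eq (d : PySem.Dict String Int) (i : String) :
    (if d.contains i then
        let d1 := d.setdefault i (d.getD i 0)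
        d1.insert i (d1.getD i 0 + 1)
      else
        let d1 := d.setdefault i 0
        d1.insert i (d1.getD i 0 + 1)) = d.insert i (d.getD i 0 + 1) := by
  by_cases h : d.contains i = true
  · simp [h, PySem.Dict.setdefault_of_contains d _ h]
  · have h' : d.contains i = false := by simpa using h
    simp [h', PySem.Dict.setdefault_of_not_contains d _ h',
      PySem.Dict.getD_insert_self, PySem.Dict.insert_insert_self,
      PySem.Dict.getD_of_not_contains d _ h']

-- two inserts at distinct keys commute as dicts when the first key is already present
lemma insert_comm_of_contains (e : PySem.Dict String Int) (x k : String) (u w : Int)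
    (hx : e.contains x = true) (hne : k ≠ x) :
    (e.insert x u).insert k w = (e.insert k w).insert x u := by
  apply PySem.Dict.ext
  have hxk : (e.insert k w).contains x = true := by
    simp [PySem.Dict.contains_insert, hx]
  by_cases hk : e.contains k = true
  · have hk' : (e.insert x u).contains k = true := by
      simp [PySem.Dict.contains_insert, hk]
    rw [PySem.Dict.items_insert_of_contains _ _ hk',
      PySem.Dict.items_insert_of_contains _ _ hx,
      PySem.Dict.items_insert_of_contains _ _ hxk,
      PySem.Dict.items_insert_of_contains _ _ hk]
    simp only [List.map_map]
    apply List.map_congr_left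
    intro p _
    by_cases hpx : p.1 = x
    · simp [Function.comp, hpx, Ne.symm hne]
    · by_cases hpk : p.1 = k <;> simp [Function.comp, hpx, hpk, hne]
  · have hk0 : e.contains k = false := by simpa using hk
    have hk' : (e.insert x u).contains k = false := by
      rw [PySem.Dict.contains_insert]
      simp [hk0, hne]
    rw [PySem.Dict.items_insert_of_not_contains _ _ hk',
      PySem.Dict.items_insert_of_contains _ _ hx,
      PySem.Dict.items_insert_of_contains _ _ hxk,
      PySem.Dict.items_insert_of_not_contains _ _ hk0]
    simp only [List.map_append, List.map_cons, List.map_nil]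
    have : ((k, w).1 == x) = false := by simp [hne]
    simp [this]

-- merging pairs whose keys avoid x does not move an already-present x-entry
lemma foldl_mg_insert_comm (ps : List (String × Int)) (e : PySem.Dict String Int)
    (x : String) (u : Int) (hx : e.contains x = true) (hps : ∀ p ∈ ps, p.1 ≠ x) :
    ps.foldl mgStep (e.insert x u) = (ps.foldl mgStep e).insert x u := by
  induction ps generalizing e with
  | nil => simp
  | cons p ps ih =>
    have hpx : p.1 ≠ x := hps p (by simp)
    have h1 : mgStep (e.insert x u) p = (mgStep e p).insert x u := by
      unfold mgStep
      rw [PySem.Dict.getD_insert_of_ne e _ _ hpx,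
        insert_comm_of_contains e x p.1 u _ hx hpx]
    rw [List.foldl_cons, List.foldl_cons, h1,
      ih (mgStep e p) (by
        unfold mgStep
        rw [PySem.Dict.contains_insert]
        simp [hx])
      (fun q hq => hps q (by simp [hq]))]

-- merging pairs whose keys avoid x leaves the value at x unchanged
lemma getD_foldl_mg (ps : List (String × Int)) (e : PySem.Dict String Int)
    (x : String) (hps : ∀ p ∈ ps, p.1 ≠ x) :
    (ps.foldl mgStep e).getD x 0 = e.getD x 0 := by
  induction ps generalizing e with
  | nil => rfl
  | cons p ps ih =>
    rw [List.foldl_cons, ih (mgStep e p) (fun q hq => hps q (by simp [hq]))]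
    exact PySem.Dict.getD_insert_of_ne e _ _ (Ne.symm (hps p (by simp)))

-- the heart: merging a bumped table = merging the table, then one more increment at x
lemma foldl_mg_bump (ps : List (String × Int)) (d : PySem.Dict String Int) (x : String)
    (hnd : (ps.map (·.1)).Nodup) :
    (bump ps x).foldl mgStep d
      = (ps.foldl mgStep d).insert x ((ps.foldl mgStep d).getD x 0 + 1) := by
  induction ps generalizing d with
  | nil => simp [bump, mgStep]
  | cons p ps ih =>
    have hnd2 := List.nodup_cons.mp (by simpa using hnd :
      (p.1 :: ps.map (·.1)).Nodup)
    have hnd' : (ps.map (·.1)).Nodup := hnd2.2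
    by_cases hpx : p.1 = x
    · have hxnotps : ∀ q ∈ ps, q.1 ≠ x := by
        intro q hq h
        exact hnd2.1 (by rw [hpx, ← h]; exact List.mem_map_of_mem hq)
      have hb : bump (p :: ps) x = (p.1, p.2 + 1) :: ps := by
        unfold bump
        rw [if_pos (by simp [hpx])]
        simp only [List.map_cons, if_pos hpx]
        congr 1
        exact (List.map_congr_left (fun q hq => by simp [hxnotps q hq])).trans
          (List.map_id ps)
      rw [hb]
      subst hpx
      have he : (d.insert p.1 (d.getD p.1 0 + p.2)).contains p.1 = true := by
        rw [PySem.Dict.contains_insert]; simp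
      rw [List.foldl_cons, List.foldl_cons]
      show ps.foldl mgStep (d.insert p.1 (d.getD p.1 0 + (p.2 + 1))) = _
      have hval : (ps.foldl mgStep (mgStep d p)).getD p.1 0 = d.getD p.1 0 + p.2 := by
        rw [getD_foldl_mg ps _ _ hxnotps]
        exact PySem.Dict.getD_insert_self d _ _ _
      rw [hval]
      have : d.insert p.1 (d.getD p.1 0 + (p.2 + 1))
          = (d.insert p.1 (d.getD p.1 0 + p.2)).insert p.1 (d.getD p.1 0 + p.2 + 1) := by
        rw [PySem.Dict.insert_insert_self, add_assoc]
      rw [this, foldl_mg_insert_comm ps _ _ _ he hxnotps]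
      rfl
    · have hb : bump (p :: ps) x = p :: bump ps x := by
        unfold bump
        by_cases hmem : x ∈ ps.map (·.1)
        · rw [if_pos (by simp [hmem]), if_pos hmem]
          simp [hpx]
        · rw [if_neg (by
              simp only [List.map_cons, List.mem_cons]
              rintro (h | h)
              · exact hpx h.symm
              · exact hmem h), if_neg hmem]
          simp
      rw [hb, List.foldl_cons, List.foldl_cons, ih (mgStep d p) hnd']

-- bumping the counter's items is exactly one more insert on the counter
lemma counter_insert_items (l : List String) (x : String) :
    ((PySem.Dict.counter l).insert x ((PySem.Dict.counter l).getD x 0 + 1)).items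
      = bump (PySem.Dict.counter l).items x := by
  by_cases hc : (PySem.Dict.counter l).contains x = true
  · have hmem : x ∈ (PySem.Dict.counter l).items.map (·.1) := by
      have := (PySem.Dict.contains_iff_mem_keys (PySem.Dict.counter l) x).mp hc
      simpa [PySem.Dict.keys] using this
    rw [PySem.Dict.items_insert_of_contains _ _ hc]
    unfold bump
    rw [if_pos hmem]
    apply List.map_congr_left
    intro p hp
    by_cases hpx : p.1 = x
    · have : (PySem.Dict.counter l).getD x 0 = p.2 := by
        have hmemp : (x, p.2) ∈ (PySem.Dict.counter l).items := by
          have : p = (x, p.2) := by rw [← hpx]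
          exact this ▸ hp
        exact PySem.Dict.getD_of_mem_items _ hmemp (PySem.Dict.nodup_keys_counter l) 0
      simp [hpx, this]
    · simp [hpx]
  · have hc' : (PySem.Dict.counter l).contains x = false := by simpa using hc
    have hmem : x ∉ (PySem.Dict.counter l).items.map (·.1) := by
      intro h
      exact absurd ((PySem.Dict.contains_iff_mem_keys (PySem.Dict.counter l) x).mpr
        (by simpa [PySem.Dict.keys] using h)) (by simp [hc'])
    rw [PySem.Dict.items_insert_of_not_contains _ _ hc',
      PySem.Dict.getD_of_not_contains _ _ hc']
    unfold bump
    rw [if_neg hmem]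
    norm_num

-- B's merge of the full frequency table equals A's one-at-a-time increment loop
lemma merge_counter_eq (l : List String) (d : PySem.Dict String Int) :
    (PySem.Dict.counter l).items.foldl mgStep d
      = l.foldl (fun d i => d.insert i (d.getD i 0 + 1)) d := by
  induction l using List.reverseRecOn with
  | nil => rfl
  | append_singleton l x ih =>
    rw [List.foldl_append, List.foldl_cons, List.foldl_nil,
      PySem.Dict.counter_append_singleton]
    show (((PySem.Dict.counter l).insert x ((PySem.Dict.counter l).getD x 0 + 1)).items).foldl mgStep d = _
    rw [counter_insert_items, foldl_mg_bump _ _ _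
      (by simpa [PySem.Dict.keys] using PySem.Dict.nodup_keys_counter l), ih]

-- ===== VERDICT (by name: the statement is the Claim_ definition above) =====
theorem addInv_spec : Claim_equal_addInv := by
  intro inv loot _
  unfold Spec_addInv addInv addInv_alt
  rw [PySem.Dict.foldl_insert_getD_add_one_eq_counter]
  congr 1
  rw [show (fun (d : PySem.Dict String Int) (kv : String × Int) =>
        d.insert kv.1 (d.getD kv.1 0 + kv.2)) = mgStep from rfl,
    merge_counter_eq]
  exact List.foldl_ext _ _ _ (fun d i _ => stepA_eq d i)
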